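-- pv_equiv track=rewrite | github.com/Robert-Schmid/uf3 | uf3/jax/ppoly.py | enumeration_to_derivative_order
-- ===== SOURCE A (Python) =====
-- def enumeration_to_derivative_order(enum, ndim):
--     order = []
--     for e in enum:
--         total = [0] * ndim
--         for i in e:
--             for j in i:
--                 total[j] += 1
--
--         for i in e:
--             order.append(total.copy())
--             for j in i:
--                 total[j] -= 1
--
--     return order
-- ===== SOURCE B (Python) =====
-- def enumeration_to_derivative_order(enum, ndim):
--     order = []
--     for e in enum:
--         acc = [0] * ndim
--         group = []
--         for i in reversed(e):
--             for j in i: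
--                 acc[j] += 1
--             group.append(acc.copy())
--         group.reverse()
--         order.extend(group)
--     return order
-- ===== Notes on version B (the rewrite author's own statement) =====
-- stated objective: alternative
-- what changed: Per group, instead of A's two forward passes (precompute the full count vector, then emit-and-decrement), B does a single reversed pass with a running accumulator, incrementing and snapshotting suffix sums, then reverses the group before extending the output.
import Mathlib
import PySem

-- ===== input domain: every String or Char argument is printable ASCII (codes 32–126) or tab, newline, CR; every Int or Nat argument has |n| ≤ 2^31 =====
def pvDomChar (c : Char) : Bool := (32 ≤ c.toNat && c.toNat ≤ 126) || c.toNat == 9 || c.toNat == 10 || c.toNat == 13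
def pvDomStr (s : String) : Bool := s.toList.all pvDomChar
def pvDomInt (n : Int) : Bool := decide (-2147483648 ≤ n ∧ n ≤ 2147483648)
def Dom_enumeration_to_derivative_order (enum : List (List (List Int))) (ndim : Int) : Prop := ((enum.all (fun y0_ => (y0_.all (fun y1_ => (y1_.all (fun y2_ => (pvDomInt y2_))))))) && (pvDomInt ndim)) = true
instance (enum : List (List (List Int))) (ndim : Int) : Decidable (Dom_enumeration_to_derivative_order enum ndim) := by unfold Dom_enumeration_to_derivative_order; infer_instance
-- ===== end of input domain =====

-- B replaces A's two forward passes per group (precompute the total count vector, then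
-- emit-and-decrement) by one reversed accumulating pass whose snapshots are the same
-- suffix sums, reversed per group (objective: alternative; no speed claim).


-- ===== PORT A =====
-- shared helper: Python's 'total[j] += d' (read, add, write back; Python negative-index rule)
def pvSetAdd (t : List Int) (j d : Int) : List Int :=
  PySem.List.pySetD t j (PySem.List.pyGetD t j 0 + d)

def enumeration_to_derivative_order (enum : List (List (List Int))) (ndim : Int) : List (List Int) :=
  enum.foldl (fun order e =>
    let total := List.replicate ndim.toNat 0
    let total := e.foldl (fun t i => i.foldl (fun t j => pvSetAdd t j 1) t) total
    (e.foldl (fun (p : List (List Int) × List Int) i =>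
      (p.1 ++ [p.2], i.foldl (fun t j => pvSetAdd t j (-1)) p.2)) (order, total)).1) []

-- ===== PORT B =====
def enumeration_to_derivative_order_alt (enum : List (List (List Int))) (ndim : Int) : List (List Int) :=
  enum.foldl (fun order e =>
    let p := e.reverse.foldl (fun (p : List (List Int) × List Int) i =>
      let a := i.foldl (fun t j => pvSetAdd t j 1) p.2
      (p.1 ++ [a], a)) ([], List.replicate ndim.toNat 0)
    order ++ p.1.reverse) []

-- ===== PRECONDITION & SPEC =====
-- Pre_ excludes exactly the inputs on which Python A raises IndexError:
-- some derivative index j falls outside the [-ndim, ndim) index range of the count vector.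
def Pre_enumeration_to_derivative_order (enum : List (List (List Int))) (ndim : Int) : Prop :=
  ∀ e ∈ enum, ∀ i ∈ e, ∀ j ∈ i, -ndim ≤ j ∧ j < ndim
instance (enum : List (List (List Int))) (ndim : Int) : Decidable (Pre_enumeration_to_derivative_order enum ndim) := by unfold Pre_enumeration_to_derivative_order; infer_instance

def pvWitness_enumeration_to_derivative_order : List (List (List Int)) × Int :=
  ([[[0], [1]], [[0, 0], []]], 2)

def Spec_enumeration_to_derivative_order (enum : List (List (List Int))) (ndim : Int) (out : List (List Int)) : Prop := out = enumeration_to_derivative_order_alt enum ndim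
instance (enum : List (List (List Int))) (ndim : Int) (out : List (List Int)) : Decidable (Spec_enumeration_to_derivative_order enum ndim out) := by unfold Spec_enumeration_to_derivative_order; infer_instance

-- ===== CLAIM (what is proved, stated in full; the proofs are below) =====
def Claim_equal_enumeration_to_derivative_order : Prop := ∀ (enum : List (List (List Int))) (ndim : Int), Dom_enumeration_to_derivative_order enum ndim → Pre_enumeration_to_derivative_order enum ndim → Spec_enumeration_to_derivative_order enum ndim (enumeration_to_derivative_order enum ndim)

-- ===== LEMMAS AND PROOFS =====
-- names for the two inner loops (definitionally the ports' folds)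
def pvIncW (c : Int) (t : List Int) (i : List Int) : List Int :=
  i.foldl (fun t j => pvSetAdd t j c) t
def pvSumW (c : Int) (t : List Int) (e : List (List Int)) : List Int :=
  e.foldl (pvIncW c) t

theorem pyIdx?_lt (n : Nat) (j : Int) (k : Nat) (h : PySem.List.pyIdx? n j = some k) : k < n := by
  unfold PySem.List.pyIdx? at h
  split_ifs at h <;> simp_all <;> omega

theorem pvSetAdd_eq (t : List Int) (j d : Int) :
    pvSetAdd t j d = match PySem.List.pyIdx? t.length j with
      | some k => t.set k (t.getD k 0 + d)
      | none => t := by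
  cases h : PySem.List.pyIdx? t.length j <;>
    simp [pvSetAdd, PySem.List.pySetD, PySem.List.pySet?, PySem.List.pyGetD, PySem.List.pyGet?, h,
      List.getD_eq_getElem?_getD]

theorem pvSetAdd_comm (t : List Int) (j d j' d' : Int) :
    pvSetAdd (pvSetAdd t j d) j' d' = pvSetAdd (pvSetAdd t j' d') j d := by
  rw [pvSetAdd_eq t j d, pvSetAdd_eq t j' d']
  cases h : PySem.List.pyIdx? t.length j with
  | none =>
    cases h' : PySem.List.pyIdx? t.length j' <;> simp [pvSetAdd_eq, h, h', List.length_set]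
  | some k =>
    have hk := pyIdx?_lt _ _ _ h
    cases h' : PySem.List.pyIdx? t.length j' with
    | none => simp [pvSetAdd_eq, h, h', List.length_set]
    | some k' =>
      have hk' := pyIdx?_lt _ _ _ h'
      rw [pvSetAdd_eq, pvSetAdd_eq]
      simp only [List.length_set, h, h']
      by_cases hkk : k = k'
      · subst hkk
        simp [List.getD_eq_getElem?_getD, hk, List.set_set]
        ring_nf
      · simp only [List.getD_eq_getElem?_getD, List.getElem?_set_ne (show k ≠ k' from hkk),
          List.getElem?_set_ne (show k' ≠ k from Ne.symm hkk)]
        rw [List.set_comm _ _ hkk]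

theorem pvSetAdd_cancel (t : List Int) (j : Int) :
    pvSetAdd (pvSetAdd t j 1) j (-1) = t := by
  rw [pvSetAdd_eq t j 1]
  cases h : PySem.List.pyIdx? t.length j with
  | none => simp [pvSetAdd_eq, h]
  | some k =>
    have hk := pyIdx?_lt _ _ _ h
    rw [pvSetAdd_eq]
    simp only [List.length_set, h]
    simp [List.getD_eq_getElem?_getD, hk, List.set_set]

theorem pvIncW_setAdd (c : Int) (i : List Int) (t : List Int) (j d : Int) :
    pvIncW c (pvSetAdd t j d) i = pvSetAdd (pvIncW c t i) j d := by
  induction i generalizing t with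
  | nil => rfl
  | cons x xs ih =>
    simp only [pvIncW, List.foldl_cons] at *
    rw [pvSetAdd_comm, ih]

theorem pvIncW_comm (c d : Int) (i i' : List Int) (t : List Int) :
    pvIncW c (pvIncW d t i') i = pvIncW d (pvIncW c t i) i' := by
  induction i' generalizing t with
  | nil => rfl
  | cons x xs ih =>
    simp only [pvIncW, List.foldl_cons] at *
    rw [ih, show List.foldl (fun t j => pvSetAdd t j c) (pvSetAdd t x d) i
          = pvSetAdd (List.foldl (fun t j => pvSetAdd t j c) t i) x d from pvIncW_setAdd c i t x d]

theorem pvSumW_incW (c d : Int) (l : List (List Int)) (i : List Int) (t : List Int) :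
    pvSumW c (pvIncW d t i) l = pvIncW d (pvSumW c t l) i := by
  induction l generalizing t with
  | nil => rfl
  | cons x xs ih =>
    simp only [pvSumW, List.foldl_cons] at *
    rw [pvIncW_comm, ih]

theorem pvIncW_cancel (i : List Int) (t : List Int) :
    pvIncW (-1) (pvIncW 1 t i) i = t := by
  induction i generalizing t with
  | nil => rfl
  | cons x xs ih =>
    simp only [pvIncW, List.foldl_cons] at *
    rw [show (xs.foldl (fun t j => pvSetAdd t j 1) (pvSetAdd t x 1)) = pvIncW 1 (pvSetAdd t x 1) xs from rfl,
        pvIncW_setAdd, pvSetAdd_cancel]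
    exact ih t

theorem pvSumW_reverse (c : Int) (l : List (List Int)) (t : List Int) :
    pvSumW c t l.reverse = pvSumW c t l := by
  induction l generalizing t with
  | nil => rfl
  | cons x xs ih =>
    simp only [List.reverse_cons, pvSumW, List.foldl_append, List.foldl_cons, List.foldl_nil] at *
    rw [ih, show List.foldl (pvIncW c) (pvIncW c t x) xs = pvSumW c (pvIncW c t x) xs from rfl,
        pvSumW_incW]
    rfl

-- A's per-group emission: the snapshots of the decrement pass
def pvEmit (t : List Int) (e : List (List Int)) : List (List Int) :=
  match e with
  | [] => []
  | i :: is => t :: pvEmit (pvIncW (-1) t i) is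

theorem pvFoldA (e : List (List Int)) (ord : List (List Int)) (t : List Int) :
    (e.foldl (fun (p : List (List Int) × List Int) i =>
      (p.1 ++ [p.2], i.foldl (fun t j => pvSetAdd t j (-1)) p.2)) (ord, t)).1
    = ord ++ pvEmit t e := by
  induction e generalizing ord t with
  | nil => simp [pvEmit]
  | cons i is ih =>
    simp only [List.foldl_cons, pvEmit]
    rw [ih]
    simp
    rfl

theorem pvFoldB_snd (l : List (List Int)) (g : List (List Int)) (a : List Int) :
    (l.foldl (fun (p : List (List Int) × List Int) i =>
      (p.1 ++ [i.foldl (fun t j => pvSetAdd t j 1) p.2], i.foldl (fun t j => pvSetAdd t j 1) p.2)) (g, a)).2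
    = pvSumW 1 a l := by
  induction l generalizing g a with
  | nil => rfl
  | cons i is ih =>
    simp only [List.foldl_cons]
    rw [ih]
    rfl

theorem pvGroup (e : List (List Int)) (z : List Int) :
    ((e.reverse.foldl (fun (p : List (List Int) × List Int) i =>
      (p.1 ++ [i.foldl (fun t j => pvSetAdd t j 1) p.2], i.foldl (fun t j => pvSetAdd t j 1) p.2)) ([], z)).1).reverse
    = pvEmit (pvSumW 1 z e) e := by
  induction e generalizing z with
  | nil => rfl
  | cons i is ih =>
    rw [List.reverse_cons, List.foldl_append]
    simp only [List.foldl_cons, List.foldl_nil, List.reverse_append, List.reverse_cons,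
      List.reverse_nil, List.nil_append, List.cons_append]
    rw [pvFoldB_snd, ih]
    have h1 : pvIncW 1 (pvSumW 1 z is.reverse) i = pvSumW 1 (pvIncW 1 z i) is := by
      rw [pvSumW_reverse, pvSumW_incW]
    have h2 : pvEmit (pvSumW 1 z is) is
        = pvEmit (pvIncW (-1) (pvSumW 1 (pvIncW 1 z i) is) i) is := by
      rw [pvSumW_incW, pvIncW_cancel]
    rw [show pvSumW 1 z (i :: is) = pvSumW 1 (pvIncW 1 z i) is from rfl, pvEmit]
    rw [show (i.foldl (fun t j => pvSetAdd t j 1) (pvSumW 1 z is.reverse))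
          = pvIncW 1 (pvSumW 1 z is.reverse) i from rfl, h1, h2]

theorem pvTop (ndim : Int) (enum : List (List (List Int))) : ∀ ord : List (List Int),
    enum.foldl (fun order e =>
      (e.foldl (fun (p : List (List Int) × List Int) i =>
        (p.1 ++ [p.2], i.foldl (fun t j => pvSetAdd t j (-1)) p.2))
        (order, e.foldl (fun t i => i.foldl (fun t j => pvSetAdd t j 1) t) (List.replicate ndim.toNat 0))).1) ord
    = enum.foldl (fun order e =>
      order ++ ((e.reverse.foldl (fun (p : List (List Int) × List Int) i =>
        (p.1 ++ [i.foldl (fun t j => pvSetAdd t j 1) p.2], i.foldl (fun t j => pvSetAdd t j 1) p.2))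
        ([], List.replicate ndim.toNat 0)).1).reverse) ord := by
  induction enum with
  | nil => intro ord; rfl
  | cons e es ih =>
    intro ord
    simp only [List.foldl_cons]
    rw [pvFoldA, show (e.foldl (fun t i => i.foldl (fun t j => pvSetAdd t j 1) t)
          (List.replicate ndim.toNat 0)) = pvSumW 1 (List.replicate ndim.toNat 0) e from rfl,
        pvGroup]
    exact ih _

-- ===== VERDICT (by name: the statement is the Claim_ definition above) =====
theorem enumeration_to_derivative_order_spec : Claim_equal_enumeration_to_derivative_order := by
  intro enum ndim _ _
  exact pvTop ndim enum []
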